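-- pv_equiv track=rewrite | github.com/ZeroDeltaSEC/Phishing-email-analyzer | modules/scoring_engine.py | score_urls
-- ===== SOURCE A (Python) =====
-- def score_urls(urls):
--     """Score URL analysis results (0-100, higher = worse)"""
--     if not urls:
--         return 0
--
--     score = 0
--     high_risk_count = 0
--     medium_risk_count = 0
--
--     for url_result in urls:
--         risk_level = url_result.get('risk_level', 'LOW')
--
--         if risk_level == 'CRITICAL':
--             score += 40
--             high_risk_count += 1
--         elif risk_level == 'HIGH':
--             score += 25
--             high_risk_count += 1
--         elif risk_level == 'MEDIUM':
--             score += 10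
--             medium_risk_count += 1
--         elif risk_level == 'LOW':
--             score += 2
--
--     # Bonus penalty for multiple high-risk URLs
--     if high_risk_count > 1:
--         score += 20
--
--     # Average the score if multiple URLs
--     if len(urls) > 1:
--         score = score // len(urls)
--
--     return min(score, 100)
-- ===== SOURCE B (Python) =====
-- _WEIGHT = {'CRITICAL': 40, 'HIGH': 25, 'MEDIUM': 10, 'LOW': 2}
--
--
-- def _tally(urls):
--     """Recursively tally (raw weighted score, number of high-risk URLs)."""
--     if not urls:
--         return (0, 0)
--     raw, high = _tally(urls[1:])
--     lvl = urls[0].get('risk_level', 'LOW')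
--     return (raw + _WEIGHT.get(lvl, 0), high + (lvl in ('CRITICAL', 'HIGH')))
--
--
-- def score_urls(urls):
--     """Score URL analysis results (0-100, higher = worse)"""
--     if not urls:
--         return 0
--     score, high_risk_count = _tally(urls)
--     if high_risk_count > 1:
--         score += 20
--     if len(urls) > 1:
--         score //= len(urls)
--     return min(score, 100)
-- ===== Notes on version B (the rewrite author's own statement) =====
-- stated objective: alternative
-- what changed: B replaces A's iterative loop with three mutable counters and an if/elif branch chain by a recursive helper that tallies the tail first and returns a (raw score, high-risk count) pair, with the per-level weight read from a table instead of branches.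
import Mathlib
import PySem

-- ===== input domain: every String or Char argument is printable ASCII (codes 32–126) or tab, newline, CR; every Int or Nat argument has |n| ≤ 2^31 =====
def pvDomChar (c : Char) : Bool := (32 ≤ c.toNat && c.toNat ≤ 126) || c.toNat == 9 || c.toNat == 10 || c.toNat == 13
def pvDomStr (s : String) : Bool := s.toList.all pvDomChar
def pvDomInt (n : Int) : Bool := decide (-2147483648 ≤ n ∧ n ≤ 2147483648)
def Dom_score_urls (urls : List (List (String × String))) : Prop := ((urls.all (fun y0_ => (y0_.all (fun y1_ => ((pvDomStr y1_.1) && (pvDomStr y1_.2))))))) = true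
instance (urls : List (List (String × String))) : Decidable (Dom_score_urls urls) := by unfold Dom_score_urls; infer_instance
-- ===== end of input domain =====

-- B replaces A's iterative three-counter loop with if/elif branches by a
-- recursive tail-first tally returning a (raw score, high-risk count) pair,
-- with per-level weights read from a table (objective: alternative decomposition).

-- ===== PORT A =====
def scoreStepA (st : Int × Int × Int) (u : List (String × String)) : Int × Int × Int :=
  let risk_level := (PySem.Dict.ofList u).getD "risk_level" "LOW"
  if risk_level = "CRITICAL" then (st.1 + 40, st.2.1 + 1, st.2.2)
  else if risk_level = "HIGH" then (st.1 + 25, st.2.1 + 1, st.2.2)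
  else if risk_level = "MEDIUM" then (st.1 + 10, st.2.1, st.2.2 + 1)
  else if risk_level = "LOW" then (st.1 + 2, st.2.1, st.2.2)
  else st

def score_urls (urls : List (List (String × String))) : Int :=
  if urls = [] then 0
  else
    let st := urls.foldl scoreStepA (0, 0, 0)
    let score := if st.2.1 > 1 then st.1 + 20 else st.1
    let score := if (urls.length : Int) > 1 then PySem.Int.floordiv score urls.length else score
    min score 100

-- ===== PORT B =====
def weightB : PySem.Dict String Int :=
  PySem.Dict.ofList [("CRITICAL", 40), ("HIGH", 25), ("MEDIUM", 10), ("LOW", 2)]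

def tallyB : List (List (String × String)) → Int × Int
  | [] => (0, 0)
  | u :: rest =>
    let p := tallyB rest
    let lvl := (PySem.Dict.ofList u).getD "risk_level" "LOW"
    (p.1 + weightB.getD lvl 0,
     p.2 + (if lvl = "CRITICAL" ∨ lvl = "HIGH" then 1 else 0))

def score_urls_alt (urls : List (List (String × String))) : Int :=
  if urls = [] then 0
  else
    let t := tallyB urls
    let score := if t.2 > 1 then t.1 + 20 else t.1
    let score := if (urls.length : Int) > 1 then PySem.Int.floordiv score urls.length else score
    min score 100

-- ===== PRECONDITION & SPEC =====
def Spec_score_urls (urls : List (List (String × String))) (out : Int) : Prop := out = score_urls_alt urls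
instance (urls : List (List (String × String))) (out : Int) : Decidable (Spec_score_urls urls out) := by unfold Spec_score_urls; infer_instance

-- ===== CLAIM (what is proved, stated in full; the proofs are below) =====
def Claim_equal_score_urls : Prop := ∀ (urls : List (List (String × String))), Dom_score_urls urls → Spec_score_urls urls (score_urls urls)

-- ===== LEMMAS AND PROOFS =====

-- The weight table evaluated at an arbitrary key.
theorem weight_getD (lvl : String) : weightB.getD lvl 0 =
    if lvl = "CRITICAL" then 40 else if lvl = "HIGH" then 25
    else if lvl = "MEDIUM" then 10 else if lvl = "LOW" then 2 else 0 := by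
  simp only [weightB, PySem.Dict.ofList, PySem.Dict.update, List.foldl,
    PySem.Dict.getD_insert]
  split_ifs <;> simp_all [PySem.Dict.getD, PySem.Dict.get?, PySem.Dict.empty]

-- Medium-risk count of A's loop, named so the fold/tally agreement is one equation.
def medCount : List (List (String × String)) → Int
  | [] => 0
  | u :: rest =>
    (if (PySem.Dict.ofList u).getD "risk_level" "LOW" = "MEDIUM" then 1 else 0) + medCount rest

-- A's left fold over its three-counter state agrees with B's tail-first recursive tally.
theorem foldA_eq_tally (urls : List (List (String × String))) (s h m : Int) :
    urls.foldl scoreStepA (s, h, m) =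
      (s + (tallyB urls).1, h + (tallyB urls).2, m + medCount urls) := by
  induction urls generalizing s h m with
  | nil => simp [tallyB, medCount]
  | cons u rest ih =>
    simp only [List.foldl_cons, tallyB, medCount, scoreStepA]
    rw [weight_getD]
    split_ifs <;> rw [ih] <;> simp_all [Prod.ext_iff] <;> omega

theorem score_urls_eq (urls : List (List (String × String))) :
    score_urls urls = score_urls_alt urls := by
  unfold score_urls score_urls_alt
  by_cases hnil : urls = []
  · simp [hnil]
  · rw [foldA_eq_tally]
    simp only [hnil, if_false, zero_add]

-- ===== VERDICT (by name: the statement is the Claim_ definition above) =====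
theorem score_urls_spec : Claim_equal_score_urls := by
  intro urls _
  unfold Spec_score_urls
  exact score_urls_eq urls
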